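-- pv_equiv track=rewrite | github.com/Axelrod-Python/Axelrod | axelrod/payoff.py | wins
-- ===== SOURCE A (Python) =====
-- def winning_player(players, payoffs):
--     """
--     The index of a winning player from a pair of payoff values
--
--     Parameters
--     ----------
--     players : tuple
--         A pair of player indexes
--     payoffs : tuple
--         A pair of payoffs for the two players
--
--     Returns
--     -------
--     integer
--         The index of the winning player or None if a draw
--     """
--     if payoffs[0] == payoffs[1]:
--         return None
--     else:
--         winning_payoff = max(payoffs)
--         winning_payoff_index = payoffs.index(winning_payoff)
--         winner = players[winning_payoff_index]
--         return winner
--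
-- def wins(payoff):
--     """
--     An n by n matrix of win counts for n players
--
--     Parameters
--     ----------
--     payoff : list
--         A matrix of the form:
--
--         [
--             [[a, j], [b, k], [c, l]],
--             [[d, m], [e, n], [f, o]],
--             [[g, p], [h, q], [i, r]],
--         ]
--
--         i.e. one row per player, containing one element per opponent (in
--         order of player index) which lists payoffs for each repetition.
--
--     Returns
--     -------
--     list
--         A wins matrix of the form:
--
--         [
--             [player1 wins in repetition1, player1 wins in repetition2],
--             [player2 wins in repetition1, player2 wins in repetition2],
--             [player3 wins in repetition1, player3 wins in repetition2],
--         ]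
--
--         i.e. one row per player which lists the total wins for that player
--         in each repetition.
--     """
--     nplayers = len(payoff)
--     repetitions = len(payoff[0][0])
--     wins = [
--         [0 for r in range(repetitions)] for p in range(nplayers)]
--     for player in range(nplayers):
--         for opponent in range(player + 1):  # Ensures we don't count wins twice
--             players = (player, opponent)
--             for repetition in range(repetitions):
--                 payoffs = (
--                     payoff[player][opponent][repetition],
--                     payoff[opponent][player][repetition])
--                 winner = winning_player(players, payoffs)
--                 if winner is not None:
--                     wins[winner][repetition] += 1
--     return wins
-- ===== SOURCE B (Python) =====
-- def wins(payoff):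
--     nplayers = len(payoff)
--     repetitions = len(payoff[0][0])
--     return [
--         [sum(1 for o in range(nplayers)
--              if payoff[p][o][r] > payoff[o][p][r])
--          for r in range(repetitions)]
--         for p in range(nplayers)]
-- ===== Notes on version B (the rewrite author's own statement) =====
-- stated objective: simpler
-- what changed: Replaces the upper-triangle pair loop that computes a winner per pair and increments a mutable wins matrix (via the winning_player helper) with a direct nested comprehension that, for each player and repetition, counts the opponents with strictly smaller reciprocal payoff.
import Mathlib
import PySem

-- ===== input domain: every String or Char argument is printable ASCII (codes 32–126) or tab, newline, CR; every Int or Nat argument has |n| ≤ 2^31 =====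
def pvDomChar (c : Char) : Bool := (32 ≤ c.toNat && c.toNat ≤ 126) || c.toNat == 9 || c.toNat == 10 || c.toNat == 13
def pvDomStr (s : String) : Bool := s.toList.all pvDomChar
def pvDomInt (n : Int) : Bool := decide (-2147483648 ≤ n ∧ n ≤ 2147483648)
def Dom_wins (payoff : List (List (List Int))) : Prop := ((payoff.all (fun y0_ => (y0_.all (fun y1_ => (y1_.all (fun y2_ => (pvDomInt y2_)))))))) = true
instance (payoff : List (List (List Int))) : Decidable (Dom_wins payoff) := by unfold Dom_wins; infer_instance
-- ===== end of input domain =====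

-- B replaces A's upper-triangle pair loop + winning_player helper with a direct nested
-- comprehension counting each player's strict wins per repetition (objective: simpler).

-- ===== PORT A =====
def winning_player (players : Int × Int) (payoffs : Int × Int) : Option Int :=
  if payoffs.1 = payoffs.2 then none
  else
    let winning_payoff := max payoffs.1 payoffs.2
    let winning_payoff_index : Int := if payoffs.1 = winning_payoff then 0 else 1
    let winner := if winning_payoff_index = 0 then players.1 else players.2
    some winner

-- list assignment wins[i] = v for an index produced by range(); the guard only makes the
-- port total — inside Pre_wins every index reached is in range, exactly as in Python
def pvSetAt {α : Type} (xs : List α) (i : Int) (v : α) : List α :=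
  if 0 ≤ i ∧ i < xs.length then xs.set i.toNat v else xs

-- wins[winner][repetition] += 1
def pvBump (w : List (List Int)) (i r : Int) : List (List Int) :=
  pvSetAt w i (pvSetAt (PySem.List.pyGetD w i []) r
    (PySem.List.pyGetD (PySem.List.pyGetD w i []) r 0 + 1))

def wins (payoff : List (List (List Int))) : List (List Int) :=
  let nplayers : Int := payoff.length
  let repetitions : Int := (PySem.List.pyGetD (PySem.List.pyGetD payoff 0 []) 0 []).length
  let wins0 : List (List Int) :=
    (PySem.List.pyRange 0 nplayers 1).map (fun _ =>
      (PySem.List.pyRange 0 repetitions 1).map (fun _ => (0 : Int)))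
  (PySem.List.pyRange 0 nplayers 1).foldl (fun w player =>
    (PySem.List.pyRange 0 (player + 1) 1).foldl (fun w opponent =>
      let players := (player, opponent)
      (PySem.List.pyRange 0 repetitions 1).foldl (fun w repetition =>
        let payoffs :=
          (PySem.List.pyGetD (PySem.List.pyGetD (PySem.List.pyGetD payoff player []) opponent []) repetition 0,
           PySem.List.pyGetD (PySem.List.pyGetD (PySem.List.pyGetD payoff opponent []) player []) repetition 0)
        match winning_player players payoffs with
        | none => w
        | some winner => pvBump w winner repetition) w) w) wins0

-- ===== PORT B =====
def wins_alt (payoff : List (List (List Int))) : List (List Int) :=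
  let nplayers : Int := payoff.length
  let repetitions : Int := (PySem.List.pyGetD (PySem.List.pyGetD payoff 0 []) 0 []).length
  (PySem.List.pyRange 0 nplayers 1).map (fun p =>
    (PySem.List.pyRange 0 repetitions 1).map (fun r =>
      ((PySem.List.pyRange 0 nplayers 1).map (fun o =>
        if PySem.List.pyGetD (PySem.List.pyGetD (PySem.List.pyGetD payoff o []) p []) r 0 <
           PySem.List.pyGetD (PySem.List.pyGetD (PySem.List.pyGetD payoff p []) o []) r 0
        then (1 : Int) else 0)).sum))

-- ===== PRECONDITION & SPEC =====
-- Pre_wins excludes exactly the inputs on which the Python A raises IndexError: the empty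
-- matrix, an empty first row (payoff[0][0] fails), or — when the repetition count read from
-- payoff[0][0] is positive, so the pair loops index — a row shorter than the number of
-- players or an accessed cell (one of the first n entries of a row) shorter than that count.
def Pre_wins (payoff : List (List (List Int))) : Prop :=
  payoff ≠ [] ∧ payoff.headD [] ≠ [] ∧
    (((payoff.headD []).headD []).length = 0 ∨
      ∀ row ∈ payoff, payoff.length ≤ row.length ∧
        ∀ cell ∈ row.take payoff.length, ((payoff.headD []).headD []).length ≤ cell.length)
instance (payoff : List (List (List Int))) : Decidable (Pre_wins payoff) := by
  unfold Pre_wins; infer_instance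

def pvWitness_wins : List (List (List Int)) :=
  [[[0, 5], [1, 2]], [[3, 2], [4, 4]]]

def Spec_wins (payoff : List (List (List Int))) (out : List (List Int)) : Prop := out = wins_alt payoff
instance (payoff : List (List (List Int))) (out : List (List Int)) : Decidable (Spec_wins payoff out) := by unfold Spec_wins; infer_instance

-- ===== CLAIM (what is proved, stated in full; the proofs are below) =====
def Claim_equal_wins : Prop := ∀ (payoff : List (List (List Int))), Dom_wins payoff → Pre_wins payoff → Spec_wins payoff (wins payoff)

-- ===== LEMMAS AND PROOFS =====
def pvA (payoff : List (List (List Int))) (p o r : Nat) : Int :=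
  ((payoff.getD p []).getD o []).getD r 0

def pvGT (payoff : List (List (List Int))) (p o r : Nat) : Bool :=
  decide (pvA payoff o p r < pvA payoff p o r)

def pvTgt (payoff : List (List (List Int))) (t : Nat × Nat × Nat) : Option (Nat × Nat) :=
  if pvGT payoff t.1 t.2.1 t.2.2 then some (t.1, t.2.2)
  else if pvGT payoff t.2.1 t.1 t.2.2 then some (t.2.1, t.2.2)
  else none

def pvStep (payoff : List (List (List Int))) (w : List (List Int)) (t : Nat × Nat × Nat) : List (List Int) :=
  match pvTgt payoff t with
  | some ir => pvBump w (ir.1 : Int) (ir.2 : Int)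
  | none => w

def pvL (n m : Nat) : List (Nat × Nat × Nat) :=
  (List.range n).flatMap (fun p =>
    (List.range (p + 1)).flatMap (fun o =>
      (List.range m).map (fun r => (p, o, r))))

lemma getD_mem {α : Type} (l : List α) (d : α) (i : Nat) (h : i < l.length) :
    l.getD i d ∈ l := by
  rw [List.getD_eq_getElem _ _ h]; exact List.getElem_mem _

lemma pvSetAt_length {α : Type} (xs : List α) (i : Int) (v : α) :
    (pvSetAt xs i v).length = xs.length := by
  unfold pvSetAt; split <;> simp

lemma pvBump_rows {m : Nat} (w : List (List Int)) (i r : Int)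
    (h : ∀ row ∈ w, row.length = m) :
    ∀ row ∈ pvBump w i r, row.length = m := by
  intro row hrow
  unfold pvBump pvSetAt at hrow
  by_cases hg : 0 ≤ i ∧ i < (w.length : Int)
  · simp only [if_pos hg] at hrow
    rcases List.mem_or_eq_of_mem_set hrow with h' | h'
    · exact h _ h'
    · subst h'
      have hm : (PySem.List.pyGetD w i []).length = m := by
        rw [PySem.List.pyGetD_of_nonneg _ _ hg.1]
        exact h _ (getD_mem _ _ _ (by omega))
      split
      · rw [List.length_set]; exact hm
      · exact hm
  · simp only [if_neg hg] at hrow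
    exact h _ hrow

lemma pvBump_entry {m : Nat} (w : List (List Int)) (i r p r' : Nat)
    (hrow : ∀ row ∈ w, row.length = m)
    (hi : i < w.length) (hp : p < w.length) (hr : r < m) :
    ((pvBump w (i : Int) (r : Int)).getD p []).getD r' 0
      = (w.getD p []).getD r' 0 + (if i = p ∧ r = r' then 1 else 0) := by
  have hrowi : (w.getD i []).length = m := hrow _ (getD_mem _ _ _ hi)
  have hgi : PySem.List.pyGetD w (i:Int) [] = w.getD i [] := by
    rw [PySem.List.pyGetD_of_nonneg _ _ (by positivity)]; simp
  have hgr : PySem.List.pyGetD (w.getD i []) (r:Int) 0 = (w.getD i []).getD r 0 := by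
    rw [PySem.List.pyGetD_of_nonneg _ _ (by positivity)]; simp
  have hnewrow : pvBump w (i:Int) (r:Int)
      = w.set i ((w.getD i []).set r ((w.getD i []).getD r 0 + 1)) := by
    unfold pvBump pvSetAt
    rw [hgi, hgr]
    rw [if_pos ⟨by positivity, by exact_mod_cast hi⟩,
        if_pos ⟨by positivity, by exact_mod_cast (hrowi ▸ hr)⟩]
    simp
  rw [hnewrow]
  by_cases hip : i = p
  · subst hip
    have hWp : (w.set i ((w.getD i []).set r ((w.getD i []).getD r 0 + 1))).getD i []
        = (w.getD i []).set r ((w.getD i []).getD r 0 + 1) := by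
      rw [List.getD_eq_getElem _ _ (by simpa using hi)]
      exact List.getElem_set_self _
    rw [hWp]
    by_cases hrr : r = r'
    · subst hrr
      rw [List.getD_eq_getElem _ _ (by rw [List.length_set, hrowi]; omega), List.getElem_set_self]
      rw [List.getD_eq_getElem _ _ (by rw [hrowi]; omega)]
      simp
    · simp only [hrr, and_false, if_false]
      by_cases hr' : r' < m
      · have h1 : r' < ((w.getD i []).set r ((w.getD i []).getD r 0 + 1)).length := by
          rw [List.length_set, hrowi]; omega
        have h2 : r' < (w.getD i []).length := by rw [hrowi]; omega
        rw [List.getD_eq_getElem _ _ h1, List.getD_eq_getElem _ _ h2,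
          List.getElem_set_ne (by omega)]
        simp
      · rw [List.getD_eq_default _ _ (by rw [List.length_set, hrowi]; omega),
          List.getD_eq_default _ _ (by rw [hrowi]; omega)]
        simp
  · have hWp : (w.set i ((w.getD i []).set r ((w.getD i []).getD r 0 + 1))).getD p []
        = w.getD p [] := by
      rw [List.getD_eq_getElem _ _ (by simpa using hp), List.getElem_set_ne hip,
        ← List.getD_eq_getElem _ ([]) hp]
    rw [hWp]
    simp [hip]

lemma pvStep_length (payoff : List (List (List Int))) (w : List (List Int)) (t : Nat × Nat × Nat) :
    (pvStep payoff w t).length = w.length := by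
  unfold pvStep; cases pvTgt payoff t <;>
    simp [pvBump, pvSetAt_length]

lemma pvStep_rows {m : Nat} (payoff : List (List (List Int))) (w : List (List Int)) (t : Nat × Nat × Nat)
    (h : ∀ row ∈ w, row.length = m) :
    ∀ row ∈ pvStep payoff w t, row.length = m := by
  unfold pvStep; cases pvTgt payoff t
  · exact h
  · exact pvBump_rows _ _ _ h

lemma pvTgt_bounds {payoff : List (List (List Int))} {t : Nat × Nat × Nat} {ir : Nat × Nat}
    (h : pvTgt payoff t = some ir) :
    (ir.1 = t.1 ∨ ir.1 = t.2.1) ∧ ir.2 = t.2.2 := by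
  unfold pvTgt at h
  split at h
  · cases h; simp
  · split at h
    · cases h; simp
    · cases h

lemma pvStep_entry {m : Nat} (payoff : List (List (List Int))) (w : List (List Int))
    (t : Nat × Nat × Nat) (p r : Nat)
    (hrow : ∀ row ∈ w, row.length = m)
    (ht : t.1 < w.length ∧ t.2.1 < w.length ∧ t.2.2 < m)
    (hp : p < w.length) (_hr : r < m) :
    ((pvStep payoff w t).getD p []).getD r 0
      = (w.getD p []).getD r 0 + (if pvTgt payoff t == some (p, r) then 1 else 0) := by
  unfold pvStep
  cases h : pvTgt payoff t with
  | none => simp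
  | some ir =>
    obtain ⟨h1, h2⟩ := pvTgt_bounds h
    have hi : ir.1 < w.length := by rcases h1 with h1 | h1 <;> rw [h1] <;> [exact ht.1; exact ht.2.1]
    have hr2 : ir.2 < m := by rw [h2]; exact ht.2.2
    rw [pvBump_entry w ir.1 ir.2 p r hrow hi hp hr2]
    congr 1
    simp [Prod.ext_iff]

lemma foldl_step_entry (payoff : List (List (List Int))) (m : Nat)
    (L : List (Nat × Nat × Nat)) (w : List (List Int))
    (hrow : ∀ row ∈ w, row.length = m)
    (hL : ∀ t ∈ L, t.1 < w.length ∧ t.2.1 < w.length ∧ t.2.2 < m)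
    (p r : Nat) (hp : p < w.length) (hr : r < m) :
    ((L.foldl (pvStep payoff) w).getD p []).getD r 0
      = (w.getD p []).getD r 0 + (L.countP (fun t => pvTgt payoff t == some (p, r)) : Int) := by
  induction L generalizing w with
  | nil => simp
  | cons t L ih =>
    rw [List.foldl_cons]
    rw [ih (pvStep payoff w t)
      (pvStep_rows payoff w t hrow)
      (by intro u hu; rw [pvStep_length]; exact hL u (List.mem_cons_of_mem _ hu))
      (by rw [pvStep_length]; exact hp) ]
    rw [pvStep_entry payoff w t p r hrow (hL t (List.mem_cons_self ..)) hp hr]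
    rw [List.countP_cons]
    split <;> push_cast <;> ring_nf

lemma countP_flatMap' {α β : Type} (l : List α) (f : α → List β) (P : β → Bool) :
    (l.flatMap f).countP P = (l.map (fun x => (f x).countP P)).sum := by
  induction l with
  | nil => simp
  | cons x xs ih => simp [List.countP_append, ih]

lemma sum_map_ite_nat {α : Type} (l : List α) (c : α → Bool) :
    (l.map (fun x => if c x then 1 else 0)).sum = l.countP c := by
  induction l with
  | nil => simp
  | cons x xs ih => by_cases h : c x <;> simp [h, ih, Nat.add_comm]

-- pred characterizations

lemma pvTgt_snd_eq {payoff : List (List (List Int))} {q o r' p r : Nat}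
    (h : (pvTgt payoff (q, o, r') == some (p, r)) = true) : r' = r := by
  rcases h' : pvTgt payoff (q, o, r') with _ | ir
  · rw [h'] at h; simp at h
  · rw [h'] at h
    have := (pvTgt_bounds h').2
    simp only [beq_iff_eq, Option.some.injEq] at h
    subst h; simpa using this.symm

lemma pvGT_irrefl (payoff : List (List (List Int))) (p r : Nat) :
    pvGT payoff p p r = false := by simp [pvGT]

lemma pvGT_asymm {payoff : List (List (List Int))} {p q r : Nat}
    (h : pvGT payoff p q r = true) : pvGT payoff q p r = false := by
  simp only [pvGT, decide_eq_true_eq, decide_eq_false_iff_not] at *; omega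

lemma pred_diag (payoff : List (List (List Int))) (p o r : Nat) :
    (pvTgt payoff (p, o, r) == some (p, r)) = pvGT payoff p o r := by
  unfold pvTgt
  simp only
  by_cases h1 : pvGT payoff p o r = true
  · rw [if_pos h1, h1]; simp
  · have h1' : pvGT payoff p o r = false := by simpa using h1
    rw [if_neg h1, h1']
    by_cases h2 : pvGT payoff o p r = true
    · rw [if_pos h2]
      have hop : o ≠ p := by
        intro he; rw [he, pvGT_irrefl] at h2; exact absurd h2 (by simp)
      simp [Prod.ext_iff, hop]
    · rw [if_neg h2]; simp

lemma pred_offdiag (payoff : List (List (List Int))) (p q o r : Nat) (hqp : q ≠ p) :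
    (pvTgt payoff (q, o, r) == some (p, r)) = (decide (o = p) && pvGT payoff p q r) := by
  unfold pvTgt
  simp only
  by_cases h1 : pvGT payoff q o r = true
  · rw [if_pos h1]
    by_cases hop : o = p
    · subst hop
      have := pvGT_asymm h1
      simp [Prod.ext_iff, hqp, this]
    · simp [Prod.ext_iff, hqp, hop]
  · rw [if_neg h1]
    by_cases h2 : pvGT payoff o q r = true
    · rw [if_pos h2]
      by_cases hop : o = p
      · subst hop; simp [h2]
      · simp [Prod.ext_iff, hop]
    · rw [if_neg h2]
      by_cases hop : o = p
      · subst hop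
        have h2' : pvGT payoff o q r = false := by simpa using h2
        simp [h2']
      · simp [hop]

lemma inner_count (payoff : List (List (List Int))) (q o p r m : Nat) (hr : r < m) :
    (List.range m).countP (fun r' => pvTgt payoff (q, o, r') == some (p, r))
      = if pvTgt payoff (q, o, r) == some (p, r) then 1 else 0 := by
  have hpred : (fun r' => pvTgt payoff (q, o, r') == some (p, r))
      = (fun r' => decide (r' = r) && (pvTgt payoff (q, o, r) == some (p, r))) := by
    funext r'
    by_cases he : r' = r
    · subst he; simp
    · have : (pvTgt payoff (q, o, r') == some (p, r)) = false := by
        by_contra hc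
        exact he (pvTgt_snd_eq (by simpa using hc))
      simp [this, he]
  rw [hpred]
  by_cases hc : (pvTgt payoff (q, o, r) == some (p, r)) = true
  · rw [hc]
    simp only [Bool.and_true, if_pos]
    have : (List.range m).countP (fun r' => decide (r' = r)) = (List.range m).count r := by
      simp [List.count]
      rfl
    rw [this, List.count_range, if_pos hr]
  · have hc' : (pvTgt payoff (q, o, r) == some (p, r)) = false := by simpa using hc
    rw [hc']
    simp

lemma countP_eq_count (l : List Nat) (p : Nat) :
    l.countP (fun o => decide (o = p)) = l.count p := by
  simp [List.count]; rfl

lemma block_count (payoff : List (List (List Int))) (p r m q : Nat) (hr : r < m) :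
    ((List.range (q + 1)).flatMap (fun o => (List.range m).map (fun r' => (q, o, r')))).countP
        (fun t => pvTgt payoff t == some (p, r))
      = if q = p then (List.range (p + 1)).countP (fun o => pvGT payoff p o r)
        else (if p < q + 1 ∧ pvGT payoff p q r = true then 1 else 0) := by
  rw [countP_flatMap']
  have hmap : ∀ o : Nat, ((List.range m).map (fun r' => (q, o, r'))).countP
      (fun t => pvTgt payoff t == some (p, r))
      = if pvTgt payoff (q, o, r) == some (p, r) then 1 else 0 := by
    intro o
    rw [List.countP_map]
    exact inner_count payoff q o p r m hr
  calc ((List.range (q + 1)).map (fun o => ((List.range m).map (fun r' => (q, o, r'))).countP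
          (fun t => pvTgt payoff t == some (p, r)))).sum
      = ((List.range (q + 1)).map (fun o =>
          if pvTgt payoff (q, o, r) == some (p, r) then 1 else 0)).sum := by
        simp only [hmap]
    _ = (List.range (q + 1)).countP (fun o => pvTgt payoff (q, o, r) == some (p, r)) :=
        sum_map_ite_nat _ _
    _ = _ := by
        by_cases hqp : q = p
        · subst hqp
          rw [if_pos rfl]
          simp only [pred_diag]
        · rw [if_neg hqp]
          simp only [pred_offdiag payoff p q _ r hqp]
          by_cases hgt : pvGT payoff p q r = true
          · rw [hgt]
            simp only [Bool.and_true]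
            rw [countP_eq_count, List.count_range]
            by_cases hpq : p < q + 1 <;> simp [hpq]
          · have hgt' : pvGT payoff p q r = false := by simpa using hgt
            rw [hgt']
            simp

lemma count_pvL (payoff : List (List (List Int))) (n m p r : Nat)
    (hp : p < n) (hr : r < m) :
    (pvL n m).countP (fun t => pvTgt payoff t == some (p, r))
      = (List.range n).countP (fun o => pvGT payoff p o r) := by
  unfold pvL
  rw [countP_flatMap']
  have hblock := block_count payoff p r m
  calc ((List.range n).map (fun q =>
          ((List.range (q + 1)).flatMap (fun o => (List.range m).map (fun r' => (q, o, r')))).countP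
            (fun t => pvTgt payoff t == some (p, r)))).sum
      = ((List.range n).map (fun q =>
          if q = p then (List.range (p + 1)).countP (fun o => pvGT payoff p o r)
          else (if p < q + 1 ∧ pvGT payoff p q r = true then 1 else 0))).sum := by
        simp only [fun q => hblock q hr]
    _ = (List.range n).countP (fun o => pvGT payoff p o r) := by
        obtain ⟨k, hk⟩ : ∃ k, n = (p + 1) + k := ⟨n - (p + 1), by omega⟩
        subst hk
        set C := (List.range (p + 1)).countP (fun o => pvGT payoff p o r) with hC
        rw [List.range_add, List.map_append, List.sum_append, List.countP_append]
        congr 1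
        · -- sum over q ≤ p equals C
          rw [List.range_succ, List.map_append, List.sum_append]
          have hz : ((List.range p).map (fun q =>
              if q = p then C
              else (if p < q + 1 ∧ pvGT payoff p q r = true then 1 else 0))).sum = 0 := by
            apply List.sum_eq_zero
            intro x hx
            simp only [List.mem_map, List.mem_range] at hx
            obtain ⟨q, hq, hqx⟩ := hx
            rw [if_neg (by omega), if_neg (by omega)] at hqx
            omega
          rw [hz, hC, List.range_succ, List.countP_append]
          simp
        · -- sum over q > p
          rw [List.map_map, List.countP_map]
          simp only [Function.comp_def]
          rw [← sum_map_ite_nat (List.range k) (fun x => pvGT payoff p (p + 1 + x) r)]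
          apply congrArg
          apply List.map_congr_left
          intro x hx
          rw [if_neg (by omega)]
          by_cases hg : pvGT payoff p (p + 1 + x) r = true
          · rw [if_pos ⟨by omega, hg⟩, if_pos hg]
          · rw [if_neg (by tauto), if_neg hg]

lemma pyGetD_chain (payoff : List (List (List Int))) (p o r : Nat) :
    PySem.List.pyGetD (PySem.List.pyGetD (PySem.List.pyGetD payoff (p:Int) []) (o:Int) []) (r:Int) 0
      = pvA payoff p o r := by
  simp [pvA, PySem.List.pyGetD_natCast]

lemma body_eq (payoff : List (List (List Int))) (w : List (List Int)) (p o r : Nat) :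
    (match winning_player ((p:Int), (o:Int))
        (pvA payoff p o r, pvA payoff o p r) with
      | none => w
      | some winner => pvBump w winner (r:Int)) = pvStep payoff w (p, o, r) := by
  unfold winning_player pvStep pvTgt pvGT
  rcases lt_trichotomy (pvA payoff p o r) (pvA payoff o p r) with h | h | h
  · have e1 : (pvA payoff p o r = pvA payoff o p r) = False := by simp only [eq_iff_iff, iff_false]; omega
    have e2 : max (pvA payoff p o r) (pvA payoff o p r) = pvA payoff o p r := max_eq_right h.le
    have e4 : decide (pvA payoff o p r < pvA payoff p o r) = false := by simp only [decide_eq_false_iff_not]; omega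
    have e5 : decide (pvA payoff p o r < pvA payoff o p r) = true := by simp only [decide_eq_true_eq]; omega
    simp [e1, e2, e4, e5]
  · have e4 : decide (pvA payoff o p r < pvA payoff p o r) = false := by simp only [decide_eq_false_iff_not]; omega
    have e5 : decide (pvA payoff p o r < pvA payoff o p r) = false := by simp only [decide_eq_false_iff_not]; omega
    simp [h]
  · have e1 : (pvA payoff p o r = pvA payoff o p r) = False := by simp only [eq_iff_iff, iff_false]; omega
    have e2 : max (pvA payoff p o r) (pvA payoff o p r) = pvA payoff p o r := max_eq_left h.le
    have e4 : decide (pvA payoff o p r < pvA payoff p o r) = true := by simp only [decide_eq_true_eq]; omega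
    simp [e1, e2, e4]

lemma pyRange_succ_nat (p : Nat) :
    PySem.List.pyRange 0 ((p:Int) + 1) 1 = (List.range (p+1)).map (fun k : Nat => (k:Int)) := by
  rw [show ((p:Int) + 1) = ((p+1 : Nat) : Int) by push_cast; ring]
  exact PySem.List.pyRange_zero_nat _

lemma wins_eq_foldl (payoff : List (List (List Int))) :
    wins payoff
      = (pvL payoff.length ((payoff.getD 0 []).getD 0 []).length).foldl (pvStep payoff)
          ((List.range payoff.length).map (fun _ =>
            (List.range ((payoff.getD 0 []).getD 0 []).length).map (fun _ => (0 : Int)))) := by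
  unfold wins
  have hreps : (PySem.List.pyGetD (PySem.List.pyGetD payoff 0 []) 0 []).length
      = ((payoff.getD 0 []).getD 0 []).length := by
    simp [PySem.List.pyGetD_ofNat']
  simp only [hreps]
  rw [pvL]
  rw [List.foldl_flatMap]
  simp only [List.foldl_flatMap, List.foldl_map]
  rw [show ((payoff.length : Nat) : Int) = ((payoff.length : Nat) : Int) from rfl]
  rw [PySem.List.pyRange_zero_nat, PySem.List.pyRange_zero_nat]
  simp only [List.foldl_map, List.map_map, pyRange_succ_nat, pyGetD_chain]
  apply PySem.List.foldl_congr_mem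
  intro w p hp
  apply PySem.List.foldl_congr_mem
  intro w' o ho
  apply PySem.List.foldl_congr_mem
  intro w'' r hr
  exact body_eq payoff w'' p o r

lemma wins_alt_eq (payoff : List (List (List Int))) :
    wins_alt payoff
      = (List.range payoff.length).map (fun p =>
          (List.range ((payoff.getD 0 []).getD 0 []).length).map (fun r =>
            ((List.range payoff.length).countP (fun o => pvGT payoff p o r) : Int))) := by
  unfold wins_alt
  have hreps : (PySem.List.pyGetD (PySem.List.pyGetD payoff 0 []) 0 []).length
      = ((payoff.getD 0 []).getD 0 []).length := by
    simp [PySem.List.pyGetD_ofNat']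
  simp only [hreps, PySem.List.pyRange_zero_nat, List.map_map]
  apply List.map_congr_left
  intro p hp
  apply List.map_congr_left
  intro r hr
  simp only [Function.comp]
  rw [← PySem.List.sum_map_ite_one_zero (fun o => pvGT payoff p o r) (List.range payoff.length)]
  apply congrArg
  apply List.map_congr_left
  intro o ho
  simp only [Function.comp_def, pyGetD_chain]
  simp [pvGT]

lemma foldl_step_length (payoff : List (List (List Int))) (L : List (Nat × Nat × Nat))
    (w : List (List Int)) : (L.foldl (pvStep payoff) w).length = w.length := by
  induction L generalizing w with
  | nil => rfl
  | cons t L ih => rw [List.foldl_cons, ih, pvStep_length]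

lemma foldl_step_rows {m : Nat} (payoff : List (List (List Int))) (L : List (Nat × Nat × Nat))
    (w : List (List Int)) (h : ∀ row ∈ w, row.length = m) :
    ∀ row ∈ L.foldl (pvStep payoff) w, row.length = m := by
  induction L generalizing w with
  | nil => exact h
  | cons t L ih => exact ih _ (pvStep_rows payoff w t h)

lemma mem_pvL {n m : Nat} {t : Nat × Nat × Nat} (h : t ∈ pvL n m) :
    t.1 < n ∧ t.2.1 < n ∧ t.2.2 < m := by
  unfold pvL at h
  simp only [List.mem_flatMap, List.mem_map, List.mem_range] at h
  obtain ⟨p, hp, o, ho, r, hr, he⟩ := h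
  subst he
  exact ⟨hp, show o < n by omega, hr⟩

lemma w0_rows (n m : Nat) :
    ∀ row ∈ (List.range n).map (fun _ => (List.range m).map (fun _ => (0 : Int))),
      row.length = m := by
  intro row hrow
  simp only [List.mem_map] at hrow
  obtain ⟨_, _, he⟩ := hrow
  subst he; simp

lemma w0_entry (n m p r : Nat) (hp : p < n) :
    (((List.range n).map (fun _ => (List.range m).map (fun _ => (0 : Int)))).getD p []).getD r 0
      = 0 := by
  have h1 : ((List.range n).map (fun _ => (List.range m).map (fun _ => (0 : Int)))).getD p []
      = (List.range m).map (fun _ => (0 : Int)) := by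
    rw [List.getD_eq_getElem _ _ (by simpa using hp)]
    simp
  rw [h1]
  by_cases hr : r < m
  · rw [List.getD_eq_getElem _ _ (by simpa using hr)]
    simp
  · rw [List.getD_eq_default _ _ (by simpa using hr)]

lemma wins_entry (payoff : List (List (List Int))) (p r : Nat)
    (hp : p < payoff.length) (hr : r < ((payoff.getD 0 []).getD 0 []).length) :
    ((wins payoff).getD p []).getD r 0
      = ((List.range payoff.length).countP (fun o => pvGT payoff p o r) : Int) := by
  rw [wins_eq_foldl]
  set n := payoff.length
  set m := ((payoff.getD 0 []).getD 0 []).length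
  set w0 := (List.range n).map (fun _ => (List.range m).map (fun _ => (0 : Int))) with hw0
  have hlen : w0.length = n := by simp [hw0]
  rw [foldl_step_entry payoff m (pvL n m) w0 (w0_rows n m)
    (by intro t ht; rw [hlen]; exact mem_pvL ht) p r (by rw [hlen]; exact hp) hr]
  rw [w0_entry n m p r hp, count_pvL payoff n m p r hp hr]
  ring

theorem wins_eq_alt (payoff : List (List (List Int))) : wins payoff = wins_alt payoff := by
  rw [wins_alt_eq]
  set n := payoff.length with hn
  set m := ((payoff.getD 0 []).getD 0 []).length with hm
  have hlen : (wins payoff).length = n := by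
    rw [wins_eq_foldl, foldl_step_length]; simp [hn]
  have hrows : ∀ row ∈ wins payoff, row.length = m := by
    rw [wins_eq_foldl]; exact foldl_step_rows payoff _ _ (w0_rows n m)
  apply List.ext_getElem
  · simp [hlen]
  intro p h1 h2
  have hp : p < n := by rw [← hlen]; exact h1
  have hrowp : (wins payoff)[p].length = m := hrows _ (List.getElem_mem h1)
  apply List.ext_getElem
  · simp [hrowp]
  intro r h3 h4
  have hr : r < m := by rw [← hrowp]; exact h3
  have hent := wins_entry payoff p r hp hr
  have e1 : (wins payoff).getD p [] = (wins payoff)[p] := List.getD_eq_getElem _ _ h1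
  rw [e1, List.getD_eq_getElem _ _ h3] at hent
  rw [hent]
  simp [hn]

-- ===== VERDICT (by name: the statement is the Claim_ definition above) =====
theorem wins_spec : Claim_equal_wins := by
  intro payoff _ _
  unfold Spec_wins
  exact wins_eq_alt payoff
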